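-- pv_equiv track=rewrite | github.com/Elran04/_MAGUS_RPG | MAGUS_pygame/hex_grid.py | hexes_in_range
-- ===== SOURCE A (Python) =====
-- def hexes_in_range(q0, r0, rng):
--     """Return a set of axial hexes within range rng from (q0, r0)."""
--     result = set()
--     for dq in range(-rng, rng + 1):
--         dr_min = max(-rng, -dq - rng)
--         dr_max = min(rng, -dq + rng)
--         for dr in range(dr_min, dr_max + 1):
--             result.add((q0 + dq, r0 + dr))
--     return result
-- ===== SOURCE B (Python) =====
-- def hex_distance(q1, r1, q2, r2):
--     dq = q1 - q2
--     dr = r1 - r2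
--     return (abs(dq) + abs(dr) + abs(dq + dr)) // 2
--
-- def hexes_in_range(q0, r0, rng):
--     """Return a set of axial hexes within range rng from (q0, r0)."""
--     return {(q, r)
--             for q in range(q0 - rng, q0 + rng + 1)
--             for r in range(r0 - rng, r0 + rng + 1)
--             if hex_distance(q, r, q0, r0) <= rng}
-- ===== Notes on version B (the rewrite author's own statement) =====
-- stated objective: alternative
-- what changed: B scans the full bounding square and keeps hexes whose axial hex distance to the center is <= rng, instead of computing per-column dr bounds with max/min; the per-column bound arithmetic disappears in favour of a uniform distance test.
import Mathlib
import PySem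

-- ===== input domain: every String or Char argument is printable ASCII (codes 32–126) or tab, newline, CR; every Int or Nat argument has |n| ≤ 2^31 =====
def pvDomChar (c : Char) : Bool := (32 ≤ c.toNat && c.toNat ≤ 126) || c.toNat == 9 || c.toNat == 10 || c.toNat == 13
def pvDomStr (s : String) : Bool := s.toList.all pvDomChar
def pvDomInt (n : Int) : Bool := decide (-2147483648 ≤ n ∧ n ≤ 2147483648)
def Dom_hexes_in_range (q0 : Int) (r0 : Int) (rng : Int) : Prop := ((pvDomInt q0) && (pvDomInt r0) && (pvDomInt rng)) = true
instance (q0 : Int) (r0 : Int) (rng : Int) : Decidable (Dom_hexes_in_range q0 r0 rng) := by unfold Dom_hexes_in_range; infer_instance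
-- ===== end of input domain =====

-- B scans the bounding square filtered by the axial hex-distance test instead of
-- computing per-column dr bounds; same return value everywhere.

-- ===== PORT A =====
def hexes_in_range (q0 : Int) (r0 : Int) (rng : Int) : List (Int × Int) :=
  (PySem.List.pyRange (-rng) (rng + 1) 1).foldl
    (fun result dq =>
      let dr_min := max (-rng) (-dq - rng)
      let dr_max := min rng (-dq + rng)
      (PySem.List.pyRange dr_min (dr_max + 1) 1).foldl
        (fun result dr => PySem.Set.add result (q0 + dq, r0 + dr)) result)
    PySem.Set.empty

-- ===== PORT B =====
def hex_distance (q1 : Int) (r1 : Int) (q2 : Int) (r2 : Int) : Int :=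
  let dq := q1 - q2
  let dr := r1 - r2
  PySem.Int.floordiv (|dq| + |dr| + |dq + dr|) 2

def hexes_in_range_alt (q0 : Int) (r0 : Int) (rng : Int) : List (Int × Int) :=
  PySem.Set.ofList
    ((PySem.List.pyRange (q0 - rng) (q0 + rng + 1) 1).flatMap (fun q =>
      ((PySem.List.pyRange (r0 - rng) (r0 + rng + 1) 1).filter
        (fun r => hex_distance q r q0 r0 ≤ rng)).map (fun r => (q, r))))

-- ===== PRECONDITION & SPEC =====
def Spec_hexes_in_range (q0 : Int) (r0 : Int) (rng : Int) (out : List (Int × Int)) : Prop := out = hexes_in_range_alt q0 r0 rng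
instance (q0 : Int) (r0 : Int) (rng : Int) (out : List (Int × Int)) : Decidable (Spec_hexes_in_range q0 r0 rng out) := by unfold Spec_hexes_in_range; infer_instance

-- ===== CLAIM (what is proved, stated in full; the proofs are below) =====
def Claim_equal_hexes_in_range : Prop := ∀ (q0 : Int) (r0 : Int) (rng : Int), Dom_hexes_in_range q0 r0 rng → Spec_hexes_in_range q0 r0 rng (hexes_in_range q0 r0 rng)

-- ===== LEMMAS AND PROOFS =====

-- one column of A's hexagon: fixed dq, dr running over A's computed bounds
def pvCol (q0 : Int) (r0 : Int) (rng : Int) (dq : Int) : List (Int × Int) :=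
  (PySem.List.pyRange (max (-rng) (-dq - rng)) (min rng (-dq + rng) + 1) 1).map
    (fun dr => (q0 + dq, r0 + dr))

lemma pvCol_fst {q0 r0 rng dq : Int} {p : Int × Int} (h : p ∈ pvCol q0 r0 rng dq) :
    p.1 = q0 + dq := by
  simp only [pvCol, List.mem_map] at h
  obtain ⟨dr, -, h⟩ := h
  simp [← h]

lemma pvCol_nodup (q0 r0 rng dq : Int) : (pvCol q0 r0 rng dq).Nodup := by
  refine List.Nodup.map ?_ (PySem.List.nodup_pyRange_one _ _)
  intro a b h
  simpa using h

lemma foldl_update_cols (q0 r0 rng : Int) (ds : List Int) (acc : List (Int × Int))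
    (hfresh : ∀ p ∈ acc, ∀ dq ∈ ds, p.1 ≠ q0 + dq) (hd : ds.Nodup) :
    ds.foldl (fun s dq => PySem.Set.update s (pvCol q0 r0 rng dq)) acc
      = acc ++ ds.flatMap (pvCol q0 r0 rng) := by
  induction ds generalizing acc with
  | nil => simp
  | cons dq tl ih =>
    simp only [List.foldl_cons, List.flatMap_cons]
    have hap := PySem.Set.update_eq_append_of_disjoint acc (pvCol q0 r0 rng dq)
      (pvCol_nodup q0 r0 rng dq)
      (fun x hx hmem => hfresh x hmem dq (List.mem_cons_self ..) (pvCol_fst hx))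
    rw [hap, ih (acc ++ pvCol q0 r0 rng dq) ?_ hd.of_cons, List.append_assoc]
    intro p hp dq' hdq'
    rcases List.mem_append.mp hp with h | h
    · exact hfresh p h dq' (List.mem_cons_of_mem _ hdq')
    · rw [pvCol_fst h]
      intro hc
      have : dq = dq' := by omega
      exact (List.nodup_cons.mp hd).1 (this ▸ hdq')

lemma hexes_in_range_eq_flatMap (q0 r0 rng : Int) :
    hexes_in_range q0 r0 rng
      = (PySem.List.pyRange (-rng) (rng + 1) 1).flatMap (pvCol q0 r0 rng) := by
  unfold hexes_in_range
  have hinner : ∀ (s : List (Int × Int)) (dq : Int),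
      (PySem.List.pyRange (max (-rng) (-dq - rng)) (min rng (-dq + rng) + 1) 1).foldl
        (fun result dr => PySem.Set.add result (q0 + dq, r0 + dr)) s
        = PySem.Set.update s (pvCol q0 r0 rng dq) := by
    intro s dq
    rw [pvCol, PySem.Set.update_map_eq_foldl_add]
  simp only [hinner]
  simpa using foldl_update_cols q0 r0 rng _ [] (by simp)
    (PySem.List.nodup_pyRange_one _ _)

lemma pyRange_shift (c a b : Int) :
    PySem.List.pyRange (c + a) (c + b) 1 =
      (PySem.List.pyRange a b 1).map (fun x => c + x) := by
  rw [PySem.List.pyRange_one, PySem.List.pyRange_one, List.map_map]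
  have h : c + b - (c + a) = b - a := by ring
  rw [h]
  apply List.map_congr_left
  intro k _
  simp only [Function.comp_apply]
  ring

-- the hex-distance test over the square is exactly A's per-column dr interval
lemma dist_iff (rng dq dr : Int) (hq : -rng ≤ dq ∧ dq < rng + 1)
    (hr : -rng ≤ dr ∧ dr < rng + 1) :
    (PySem.Int.floordiv (|dq| + |dr| + |dq + dr|) 2 ≤ rng)
      ↔ (max (-rng) (-dq - rng) ≤ dr ∧ dr < min rng (-dq + rng) + 1) := by
  rw [PySem.Int.floordiv_eq_ediv_of_pos (by omega)]
  rw [Int.abs_eq_natAbs, Int.abs_eq_natAbs, Int.abs_eq_natAbs]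
  omega

lemma filter_range_eq (rng dq : Int) (hq : -rng ≤ dq ∧ dq < rng + 1) :
    (PySem.List.pyRange (-rng) (rng + 1) 1).filter
        (fun dr => decide (PySem.Int.floordiv (|dq| + |dr| + |dq + dr|) 2 ≤ rng))
      = PySem.List.pyRange (max (-rng) (-dq - rng)) (min rng (-dq + rng) + 1) 1 := by
  refine List.Perm.eq_of_pairwise (le := (· < ·))
    (fun a b _ _ h1 h2 => absurd h2 (lt_asymm h1))
    ((PySem.List.pairwise_lt_pyRange_one _ _).filter _)
    (PySem.List.pairwise_lt_pyRange_one _ _) ?_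
  rw [List.perm_ext_iff_of_nodup ((PySem.List.nodup_pyRange_one _ _).filter _)
    (PySem.List.nodup_pyRange_one _ _)]
  intro x
  rw [List.mem_filter, PySem.List.mem_pyRange_one, PySem.List.mem_pyRange_one,
    decide_eq_true_iff]
  constructor
  · rintro ⟨hm, hc⟩
    have := (dist_iff rng dq x hq hm).mp hc
    omega
  · intro hm
    have hmem : -rng ≤ x ∧ x < rng + 1 := by omega
    exact ⟨hmem, (dist_iff rng dq x hq hmem).mpr (by omega)⟩

lemma alt_eq_flatMap (q0 r0 rng : Int) :
    hexes_in_range_alt q0 r0 rng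
      = (PySem.List.pyRange (-rng) (rng + 1) 1).flatMap (pvCol q0 r0 rng) := by
  unfold hexes_in_range_alt
  have hqsh : PySem.List.pyRange (q0 - rng) (q0 + rng + 1) 1
      = (PySem.List.pyRange (-rng) (rng + 1) 1).map (fun x => q0 + x) := by
    have h := pyRange_shift q0 (-rng) (rng + 1)
    simpa [sub_eq_add_neg, add_assoc] using h
  have hrsh : PySem.List.pyRange (r0 - rng) (r0 + rng + 1) 1
      = (PySem.List.pyRange (-rng) (rng + 1) 1).map (fun x => r0 + x) := by
    have h := pyRange_shift r0 (-rng) (rng + 1)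
    simpa [sub_eq_add_neg, add_assoc] using h
  have hcols : (PySem.List.pyRange (q0 - rng) (q0 + rng + 1) 1).flatMap (fun q =>
      ((PySem.List.pyRange (r0 - rng) (r0 + rng + 1) 1).filter
        (fun r => hex_distance q r q0 r0 ≤ rng)).map (fun r => (q, r)))
      = (PySem.List.pyRange (-rng) (rng + 1) 1).flatMap (pvCol q0 r0 rng) := by
    rw [hqsh, List.flatMap_map]
    apply List.flatMap_congr
    intro dq hdq
    rw [PySem.List.mem_pyRange_one] at hdq
    rw [hrsh, List.filter_map, List.map_map]
    have hpred : ((fun r => decide (hex_distance (q0 + dq) r q0 r0 ≤ rng)) ∘ (fun x => r0 + x))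
        = (fun dr => decide (PySem.Int.floordiv (|dq| + |dr| + |dq + dr|) 2 ≤ rng)) := by
      funext dr
      have h1 : hex_distance (q0 + dq) (r0 + dr) q0 r0
          = PySem.Int.floordiv (|dq| + |dr| + |dq + dr|) 2 := by
        simp only [hex_distance]
        have e1 : q0 + dq - q0 = dq := by ring
        have e2 : r0 + dr - r0 = dr := by ring
        rw [e1, e2]
      simp [h1]
    rw [hpred, filter_range_eq rng dq hdq]
    rfl
  rw [hcols]
  refine PySem.Set.ofList_eq_self_of_nodup _ (List.nodup_flatMap.mpr ⟨?_, ?_⟩)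
  · exact fun dq _ => pvCol_nodup q0 r0 rng dq
  · refine (PySem.List.pairwise_lt_pyRange_one _ _).imp ?_
    intro dq dq' hlt p hp hp'
    have h1 := pvCol_fst hp
    have h2 := pvCol_fst hp'
    omega

-- ===== VERDICT (by name: the statement is the Claim_ definition above) =====
theorem hexes_in_range_spec : Claim_equal_hexes_in_range := by
  intro q0 r0 rng _
  unfold Spec_hexes_in_range
  rw [hexes_in_range_eq_flatMap, alt_eq_flatMap]
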